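-- pv_equiv track=rewrite | github.com/h1yung/pywebio_apps | notetube/notetubeUtils.py | is_valid_watchkey
-- ===== SOURCE A (Python) =====
-- def is_valid_watchkey(watchkey):
--     '''VALIDATION: if watchkey consists of only alphanumeric characters or not'''
--
--     valid_char_set = [character for character in '0123456789ABCDEFGHJKLMNPRSTUVWXYZabcdefghijkmnopqrstuvwxyz']
--
--     if watchkey == "":
--         return
--     else:
--         for character in watchkey:
--             if character not in valid_char_set:
--                 return "only alphanumeric characters are acceptable."
-- ===== SOURCE B (Python) =====
-- def is_valid_watchkey(watchkey):
--     '''VALIDATION: if watchkey consists of only alphanumeric characters or not'''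
--     def ok(o):
--         # arithmetic classification by code point: digit, uppercase minus I/O/Q, lowercase minus l
--         if 48 <= o <= 57:
--             return True
--         if 65 <= o <= 90:
--             return o not in (73, 79, 81)
--         if 97 <= o <= 122:
--             return o != 108
--         return False
--     if sum(1 for c in watchkey if ok(ord(c))) != len(watchkey):
--         return "only alphanumeric characters are acceptable."
-- ===== Notes on version B (the rewrite author's own statement) =====
-- stated objective: alternative
-- what changed: Replaced the early-return scan that tests each character for membership in a copied 59-character alphabet list by arithmetic classification of each code point (digit range, uppercase range minus I/O/Q, lowercase range minus l) combined with a count-of-valid-characters vs length comparison; no alphabet string or container and no early exit remain.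
import Mathlib
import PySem

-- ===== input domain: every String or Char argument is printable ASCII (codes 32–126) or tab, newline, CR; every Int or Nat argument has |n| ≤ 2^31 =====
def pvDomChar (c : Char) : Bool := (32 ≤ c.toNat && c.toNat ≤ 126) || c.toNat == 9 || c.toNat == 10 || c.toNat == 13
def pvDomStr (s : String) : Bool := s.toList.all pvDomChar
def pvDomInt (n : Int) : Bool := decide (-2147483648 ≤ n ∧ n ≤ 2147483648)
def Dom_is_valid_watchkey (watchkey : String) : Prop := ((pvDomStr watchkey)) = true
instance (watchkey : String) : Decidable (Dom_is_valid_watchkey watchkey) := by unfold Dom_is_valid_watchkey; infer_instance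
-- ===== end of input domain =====

-- B replaces A's per-character membership scan against a copied alphabet list by arithmetic
-- classification of each code point (digit / uppercase minus I,O,Q / lowercase minus l) and a
-- count-vs-length comparison (alternative decomposition; not claimed faster).

-- ===== PORT A =====
-- valid_char_set = [character for character in '…']  (a LIST of the alphabet's characters)
def pvValidCharListA : List Char :=
  ("0123456789ABCDEFGHJKLMNPRSTUVWXYZabcdefghijkmnopqrstuvwxyz").toList

-- the for-loop: first character not in the list returns the message, falling off the end returns None
def pvLoopA : List Char → Option String
  | [] => none
  | c :: rest =>
      if pvValidCharListA.contains c then pvLoopA rest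
      else some "only alphanumeric characters are acceptable."

def is_valid_watchkey (watchkey : String) : Option String :=
  if watchkey = "" then none
  else pvLoopA watchkey.toList

-- ===== PORT B =====
-- def ok(o): arithmetic classification of a code point
def pvOkB (o : Nat) : Bool :=
  if 48 ≤ o ∧ o ≤ 57 then true
  else if 65 ≤ o ∧ o ≤ 90 then ¬ (o = 73 ∨ o = 79 ∨ o = 81)
  else if 97 ≤ o ∧ o ≤ 122 then o ≠ 108
  else false

-- sum(1 for c in watchkey if ok(ord(c))) != len(watchkey)
def is_valid_watchkey_alt (watchkey : String) : Option String :=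
  if watchkey.toList.countP (fun c => pvOkB c.toNat) ≠ watchkey.toList.length then
    some "only alphanumeric characters are acceptable."
  else none

-- ===== PRECONDITION & SPEC =====
def Spec_is_valid_watchkey (watchkey : String) (out : Option String) : Prop := out = is_valid_watchkey_alt watchkey
instance (watchkey : String) (out : Option String) : Decidable (Spec_is_valid_watchkey watchkey out) := by unfold Spec_is_valid_watchkey; infer_instance

-- ===== CLAIM (what is proved, stated in full; the proofs are below) =====
def Claim_equal_is_valid_watchkey : Prop := ∀ (watchkey : String), Dom_is_valid_watchkey watchkey → Spec_is_valid_watchkey watchkey (is_valid_watchkey watchkey)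

-- ===== LEMMAS AND PROOFS =====

-- on code points below 128, B's arithmetic classifier agrees with membership in A's alphabet
set_option maxRecDepth 4096 in
theorem pvOk_eq_contains_code :
    ∀ n < 128, pvOkB n = (pvValidCharListA.map Char.toNat).contains n := by
  decide

-- lifted to characters in the domain
theorem pvOk_eq_contains (c : Char) (h : pvDomChar c = true) :
    pvOkB c.toNat = pvValidCharListA.contains c := by
  have hlt : c.toNat < 128 := by
    simp [pvDomChar] at h
    omega
  rw [pvOk_eq_contains_code c.toNat hlt]
  simp only [List.contains_eq_any_beq, List.any_map]
  apply List.any_congr rfl (fun d => ?_)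
  rcases Bool.eq_false_or_eq_true (c == d) with hb | hb
  · have he : c = d := by simpa using hb
    rw [hb]; simpa using congrArg Char.toNat he
  · have hne : c ≠ d := by simpa using hb
    have hnn : c.toNat ≠ d.toNat := fun hn => hne (Char.ext (UInt32.toNat_inj.mp hn))
    rw [hb]; simpa using hnn

-- A's loop returns none exactly when every character is in the alphabet
theorem pvLoopA_eq (l : List Char) :
    pvLoopA l = if l.all (fun c => pvValidCharListA.contains c) then none
                else some "only alphanumeric characters are acceptable." := by
  induction l with
  | nil => rfl
  | cons c rest ih =>
      simp only [pvLoopA, List.all_cons, ih]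
      by_cases hm : c ∈ pvValidCharListA <;> simp [hm]

-- ===== VERDICT (by name: the statement is the Claim_ definition above) =====
theorem is_valid_watchkey_spec : Claim_equal_is_valid_watchkey := by
  intro w hdom
  unfold Spec_is_valid_watchkey is_valid_watchkey is_valid_watchkey_alt
  have hall : ∀ c ∈ w.toList, pvDomChar c = true := by
    simpa [Dom_is_valid_watchkey, pvDomStr, List.all_eq_true] using hdom
  have hiff : (w.toList.countP (fun c => pvOkB c.toNat) = w.toList.length)
      ↔ (w.toList.all (fun c => pvValidCharListA.contains c) = true) := by
    rw [List.countP_eq_length, List.all_eq_true]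
    constructor
    · intro h c hc; rw [← pvOk_eq_contains c (hall c hc)]; exact h c hc
    · intro h c hc; rw [pvOk_eq_contains c (hall c hc)]; exact h c hc
  by_cases hw : w = ""
  · subst hw; decide
  · rw [if_neg hw, pvLoopA_eq]
    by_cases hcnt : w.toList.countP (fun c => pvOkB c.toNat) = w.toList.length
    · rw [if_pos (hiff.mp hcnt), if_neg (by simp [hcnt])]
    · rw [if_neg (fun habs => hcnt (hiff.mpr habs)), if_pos hcnt]
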